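-- pv_equiv track=rewrite | github.com/Paxlord/ProjetBrython | verif.py | memeNombreZeroUn
-- ===== SOURCE A (Python) =====
-- def memeNombreZeroUn(taille, tableau, colonne):
--
--
--     if colonne:
--         firstRow = [0,0]
--         for i in range(0, taille):
--             if tableau[i][0] == 1:
--                 firstRow[0] += 1
--             else:
--                 firstRow[1] += 1
--
--         if(firstRow[0] != firstRow[1]):
--             return False
--
--         for i in range(0, taille):
--
--             rowToTest= [0,0]
--
--             for j in range(0, taille):
--                 if tableau[i][j] == 1:
--                     rowToTest[0] += 1
--                 else:
--                     rowToTest[1] += 1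
--
--             if rowToTest[0] != firstRow[0] or rowToTest[1] != firstRow[1]:
--                 return False
--     else:
--         firstColumn = [0,0]
--         for i in range(0, taille):
--             if tableau[0][i] == 1:
--                 firstColumn[0] += 1
--             else:
--                 firstColumn[1] += 1
--
--         if(firstColumn[0] != firstColumn[1]):
--             return False
--
--         for i in range(0, taille):
--
--             columnToTest = [0,0]
--
--             for j in range(0, taille):
--                 if tableau[j][i] == 1:
--                     columnToTest[0] += 1
--                 else:
--                     columnToTest[1] += 1
--
--             if columnToTest[0] != firstColumn[0] or columnToTest[1] != firstColumn[1]: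
--                 return False
--
--     return True
-- ===== SOURCE B (Python) =====
-- def memeNombreZeroUn(taille, tableau, colonne):
--     # One sweep over all cells: accumulate a signed balance (+1 for a 1, -1 otherwise)
--     # per line into a vector, plus one balance for A's reference line (column 0 / row 0),
--     # then check every balance is zero. No early exits, no count-and-compare.
--     bal = [0] * taille if taille > 0 else []
--     cross = 0
--     for i in range(taille):
--         for j in range(taille):
--             d = 1 if tableau[i][j] == 1 else -1
--             bal[i if colonne else j] += d
--             if (j == 0) if colonne else (i == 0):
--                 cross += d
--     return cross == 0 and all(b == 0 for b in bal)
-- ===== Notes on version B (the rewrite author's own statement) =====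
-- stated objective: alternative
-- what changed: B replaces A's staged count-the-first-line-then-compare-each-line scans with early returns by one sweep over all cells that accumulates signed +1/-1 balances into a per-line vector (plus one balance for the reference line) and finally checks all balances are zero.
-- outside the precondition, e.g. on memeNombreZeroUn(2, [[0], [0]], True): A returns False, B raises IndexError
import Mathlib
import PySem

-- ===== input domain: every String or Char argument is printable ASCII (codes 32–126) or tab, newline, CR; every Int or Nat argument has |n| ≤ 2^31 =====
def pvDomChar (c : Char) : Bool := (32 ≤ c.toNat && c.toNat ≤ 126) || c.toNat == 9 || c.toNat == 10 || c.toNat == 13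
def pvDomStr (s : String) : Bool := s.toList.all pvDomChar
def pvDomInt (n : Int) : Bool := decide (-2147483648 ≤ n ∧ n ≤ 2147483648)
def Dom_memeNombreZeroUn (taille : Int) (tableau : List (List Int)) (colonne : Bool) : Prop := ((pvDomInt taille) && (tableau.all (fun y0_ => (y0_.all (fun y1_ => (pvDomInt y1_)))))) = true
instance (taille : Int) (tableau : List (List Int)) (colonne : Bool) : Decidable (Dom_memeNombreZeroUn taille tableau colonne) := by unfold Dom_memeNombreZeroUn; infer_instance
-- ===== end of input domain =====

-- B replaces A's staged count-first-line/compare-each-line scans with early returns by ONE sweep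
-- over all cells accumulating signed ±1 balances into a per-line vector (plus a reference-line
-- balance), finally checking all balances are zero (objective: alternative decomposition).

-- ===== PORT A =====
-- tableau[i][j]: pyGetD with defaults — exact whenever both indices are in range, which Pre_ guarantees.
def memeNombreZeroUn (taille : Int) (tableau : List (List Int)) (colonne : Bool) : Bool :=
  if colonne then
    let firstRow : Int × Int :=
      (PySem.List.pyRange 0 taille 1).foldl
        (fun (p : Int × Int) i =>
          if PySem.List.pyGetD (PySem.List.pyGetD tableau i []) 0 0 = 1 then (p.1 + 1, p.2)
          else (p.1, p.2 + 1)) (0, 0)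
    if firstRow.1 ≠ firstRow.2 then false
    else
      -- the loop's early 'return False' ≡ .all of the negated test
      (PySem.List.pyRange 0 taille 1).all (fun i =>
        let rowToTest : Int × Int :=
          (PySem.List.pyRange 0 taille 1).foldl
            (fun (p : Int × Int) j =>
              if PySem.List.pyGetD (PySem.List.pyGetD tableau i []) j 0 = 1 then (p.1 + 1, p.2)
              else (p.1, p.2 + 1)) (0, 0)
        rowToTest.1 == firstRow.1 && rowToTest.2 == firstRow.2)
  else
    let firstColumn : Int × Int :=
      (PySem.List.pyRange 0 taille 1).foldl
        (fun (p : Int × Int) i =>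
          if PySem.List.pyGetD (PySem.List.pyGetD tableau 0 []) i 0 = 1 then (p.1 + 1, p.2)
          else (p.1, p.2 + 1)) (0, 0)
    if firstColumn.1 ≠ firstColumn.2 then false
    else
      (PySem.List.pyRange 0 taille 1).all (fun i =>
        let columnToTest : Int × Int :=
          (PySem.List.pyRange 0 taille 1).foldl
            (fun (p : Int × Int) j =>
              if PySem.List.pyGetD (PySem.List.pyGetD tableau j []) i 0 = 1 then (p.1 + 1, p.2)
              else (p.1, p.2 + 1)) (0, 0)
        columnToTest.1 == firstColumn.1 && columnToTest.2 == firstColumn.2)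

-- ===== PORT B =====
-- tableau[i][j]: pyGetD with defaults — exact whenever both indices are in range, which Pre_ guarantees.
def pvCellB (tableau : List (List Int)) (i j : Int) : Int :=
  PySem.List.pyGetD (PySem.List.pyGetD tableau i []) j 0

def memeNombreZeroUn_alt (taille : Int) (tableau : List (List Int)) (colonne : Bool) : Bool :=
  -- st = (bal, cross) after the sweep; then 'cross == 0 and all(b == 0 for b in bal)'
  (fun st : List Int × Int => st.2 == 0 && st.1.all (fun b => b == 0))
    ((PySem.List.pyRange 0 taille 1).foldl (fun st i =>
        (PySem.List.pyRange 0 taille 1).foldl (fun (st : List Int × Int) j =>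
          (st.1.set (if colonne then i else j).toNat
             (st.1.getD (if colonne then i else j).toNat 0 +
               (if pvCellB tableau i j = 1 then 1 else -1)),
           if (if colonne then j = 0 else i = 0)
             then st.2 + (if pvCellB tableau i j = 1 then 1 else -1) else st.2)) st)
      ((if 0 < taille then List.replicate taille.toNat 0 else []), 0))

-- ===== PRECONDITION & SPEC =====
-- Pre_ excludes taille > 0 inputs whose first taille rows are missing or shorter than taille entries,
-- where Python's indexing raises IndexError; on some such ragged inputs A still returns False through
-- an early exit before reaching the short row (see the cite), but B naturally raises there.
def Pre_memeNombreZeroUn (taille : Int) (tableau : List (List Int)) (colonne : Bool) : Prop :=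
  0 < taille →
    (taille ≤ (tableau.length : Int) ∧
      ∀ row ∈ tableau.take taille.toNat, taille ≤ (row.length : Int))
instance (taille : Int) (tableau : List (List Int)) (colonne : Bool) : Decidable (Pre_memeNombreZeroUn taille tableau colonne) := by unfold Pre_memeNombreZeroUn; infer_instance

def pvWitness_memeNombreZeroUn : Int × List (List Int) × Bool := (2, [[1, 0], [0, 1]], true)

def Spec_memeNombreZeroUn (taille : Int) (tableau : List (List Int)) (colonne : Bool) (out : Bool) : Prop := out = memeNombreZeroUn_alt taille tableau colonne
instance (taille : Int) (tableau : List (List Int)) (colonne : Bool) (out : Bool) : Decidable (Spec_memeNombreZeroUn taille tableau colonne out) := by unfold Spec_memeNombreZeroUn; infer_instance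

-- ===== CLAIM (what is proved, stated in full; the proofs are below) =====
def Claim_equal_memeNombreZeroUn : Prop := ∀ (taille : Int) (tableau : List (List Int)) (colonne : Bool), Dom_memeNombreZeroUn taille tableau colonne → Pre_memeNombreZeroUn taille tableau colonne → Spec_memeNombreZeroUn taille tableau colonne (memeNombreZeroUn taille tableau colonne)

-- ===== LEMMAS AND PROOFS =====

-- The signed contribution of one cell in B's sweep.
def pvD (t : List (List Int)) (i j : Int) : Int := if pvCellB t i j = 1 then 1 else -1

-- A's counting loop over a line: the pair it maintains is (ones, length - ones).
lemma pvFoldCount (f : Int → Int) (l : List Int) (a b : Int) :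
    l.foldl
      (fun (p : Int × Int) x => if f x = 1 then (p.1 + 1, p.2) else (p.1, p.2 + 1)) (a, b)
    = (a + ((l.map f).count 1 : Int), b + (l.length : Int) - ((l.map f).count 1 : Int)) := by
  induction l generalizing a b with
  | nil => simp
  | cons x l ih =>
    by_cases h : f x = 1
    · simp only [List.foldl_cons, ih, List.map_cons, List.count_cons,
        List.length_cons, h, Prod.mk.injEq, beq_self_eq_true, if_true]
      constructor <;> push_cast <;> ring_nf
    · have hb : (f x == 1) = false := beq_eq_false_iff_ne.mpr h
      simp only [List.foldl_cons, if_neg h, ih, List.map_cons, List.count_cons,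
        List.length_cons, hb, Prod.mk.injEq]
      constructor <;> push_cast <;> ring_nf

-- A's shape ('first line balanced, every line matches it') equals the canonical
-- 'first line balanced, every line balanced', for any per-line one-counts.
lemma pvFinal (n : Int) (l : List Int) (c0 : Int) (ci : Int → Int) :
    (if c0 ≠ n - c0 then false
     else l.all (fun i => (ci i == c0) && (n - ci i == n - c0)))
    = ((decide (2 * c0 = n)) && l.all (fun i => decide (2 * ci i = n))) := by
  by_cases h0 : 2 * c0 = n
  · rw [if_neg (by omega), decide_eq_true h0, Bool.true_and]
    congr 1; funext i
    rw [Bool.eq_iff_iff]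
    simp only [Bool.and_eq_true, beq_iff_eq, decide_eq_true_eq]
    omega
  · rw [if_pos (by omega), decide_eq_false h0, Bool.false_and]

-- A fold whose step acts componentwise on a pair splits into two folds.
lemma pvFoldlProd {α β γ : Type} (f : α → γ → α) (g : β → γ → β) (l : List γ) (a : α) (b : β) :
    l.foldl (fun st x => (f st.1 x, g st.2 x)) (a, b) = (l.foldl f a, l.foldl g b) := by
  induction l generalizing a b with
  | nil => rfl
  | cons x l ih => simpa using ih (f a x) (g b x)

-- Conditional accumulation fold = initial value + sum of guarded contributions.
lemma pvFoldlIteAdd (P : Int → Prop) [DecidablePred P] (d : Int → Int) (l : List Int) (c : Int) :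
    l.foldl (fun c j => if P j then c + d j else c) c
    = c + (l.map (fun j => if P j then d j else 0)).sum := by
  induction l generalizing c with
  | nil => simp
  | cons j l ih =>
    simp only [List.foldl_cons, List.map_cons, List.sum_cons, ih]
    split_ifs <;> ring

lemma pvSumZero (x : Int → Int) (l : List Int) (h : ∀ j ∈ l, x j = 0) :
    (l.map x).sum = 0 := by
  apply List.sum_eq_zero
  intro y hy
  obtain ⟨j, hj, rfl⟩ := List.mem_map.mp hy
  exact h j hj

-- A guarded sum over range(0, n) with a single hit at k.
lemma pvSingleHit (n : Int) (k : Nat) (hk : (k : Int) < n) (x : Int → Int) :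
    ((PySem.List.pyRange 0 n 1).map (fun i => if i = (k : Int) then x i else 0)).sum = x k := by
  rw [PySem.List.pyRange_one_append 0 (k : Int) n (by positivity) (by omega),
      PySem.List.pyRange_one_cons hk]
  rw [List.map_append, List.map_cons, List.sum_append, List.sum_cons, if_pos rfl]
  rw [pvSumZero _ _ (fun j hj => by
        rw [if_neg]; have := (PySem.List.mem_pyRange_one.mp hj); omega),
      pvSumZero _ _ (fun j hj => by
        rw [if_neg]; have := (PySem.List.mem_pyRange_one.mp hj); omega)]
  ring

-- Sum of ±1 contributions over a line = 2·(number of ones) − length.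
lemma pvSumPM (f : Int → Int) (l : List Int) :
    (l.map (fun j => if f j = 1 then (1 : Int) else -1)).sum
    = 2 * ((l.map f).count 1 : Int) - l.length := by
  induction l with
  | nil => simp
  | cons j l ih =>
    by_cases h : f j = 1
    · have hb : (f j == 1) = true := beq_iff_eq.mpr h
      simp only [List.map_cons, List.sum_cons, if_pos h, ih, List.count_cons, hb,
        List.length_cons]
      push_cast; ring
    · have hb : (f j == 1) = false := beq_eq_false_iff_ne.mpr h
      simp only [List.map_cons, List.sum_cons, if_neg h, ih, List.count_cons, hb,
        List.length_cons]
      push_cast; ring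

-- getD after a single set.
lemma pvGetDSet (l : List Int) (i k : Nat) (x : Int) :
    (l.set i x).getD k 0 = if i = k ∧ k < l.length then x else l.getD k 0 := by
  by_cases hk : k < l.length
  · by_cases hik : i = k
    · subst hik
      rw [if_pos ⟨rfl, hk⟩, List.getD_eq_getElem _ _ (by simpa using hk),
          List.getElem_set_self (by simpa using hk)]
    · rw [if_neg (by tauto), List.getD_eq_getElem _ _ (by simpa using hk),
          List.getD_eq_getElem _ _ hk, List.getElem_set_ne hik]
  · rw [if_neg (by tauto), List.getD_eq_default _ _ (by simpa using Nat.le_of_not_lt hk),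
        List.getD_eq_default _ _ (Nat.le_of_not_lt hk)]

-- Length invariance of the set-accumulating folds (column-indexed / constant-indexed).
lemma pvSetFoldLenCol (d : Int → Int) (l : List Int) :
    ∀ bal : List Int,
      (l.foldl (fun b j => b.set j.toNat (b.getD j.toNat 0 + d j)) bal).length = bal.length := by
  induction l with
  | nil => intro bal; rfl
  | cons j l ih => intro bal; rw [List.foldl_cons, ih, List.length_set]

lemma pvSetFoldLenConst (m : Nat) (d : Int → Int) (l : List Int) :
    ∀ bal : List Int,
      (l.foldl (fun b j => b.set m (b.getD m 0 + d j)) bal).length = bal.length := by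
  induction l with
  | nil => intro bal; rfl
  | cons j l ih => intro bal; rw [List.foldl_cons, ih, List.length_set]

-- One pass of set-accumulation, characterised entrywise.
lemma pvSetFoldGetDCol (d : Int → Int) (l : List Int) :
    ∀ (bal : List Int) (k : Nat),
      (l.foldl (fun b j => b.set j.toNat (b.getD j.toNat 0 + d j)) bal).getD k 0
      = bal.getD k 0 + (l.map (fun j => if j.toNat = k ∧ k < bal.length then d j else 0)).sum := by
  induction l with
  | nil => intro bal k; simp
  | cons j l ih =>
    intro bal k
    rw [List.foldl_cons, ih, List.length_set, pvGetDSet]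
    simp only [List.map_cons, List.sum_cons]
    split_ifs with h
    · rw [h.1]; ring
    · ring

lemma pvSetFoldGetDConst (m : Nat) (d : Int → Int) (l : List Int) :
    ∀ (bal : List Int) (k : Nat),
      (l.foldl (fun b j => b.set m (b.getD m 0 + d j)) bal).getD k 0
      = bal.getD k 0 + (l.map (fun j => if m = k ∧ k < bal.length then d j else 0)).sum := by
  induction l with
  | nil => intro bal k; simp
  | cons j l ih =>
    intro bal k
    rw [List.foldl_cons, ih, List.length_set, pvGetDSet]
    simp only [List.map_cons, List.sum_cons]
    split_ifs with h
    · rw [h.1]; ring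
    · ring

-- Two nested passes of set-accumulation, characterised entrywise.
lemma pvSetFold2GetDCol (dd : Int → Int → Int) (js l : List Int) :
    ∀ (bal : List Int) (k : Nat),
      (l.foldl (fun b i =>
          js.foldl (fun b2 j => b2.set j.toNat (b2.getD j.toNat 0 + dd i j)) b) bal).getD k 0
      = bal.getD k 0
        + (l.map (fun i =>
            (js.map (fun j => if j.toNat = k ∧ k < bal.length then dd i j else 0)).sum)).sum := by
  induction l with
  | nil => intro bal k; simp
  | cons i l ih =>
    intro bal k
    rw [List.foldl_cons, ih, pvSetFoldGetDCol (dd i) js bal, pvSetFoldLenCol (dd i) js bal]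
    simp only [List.map_cons, List.sum_cons]
    ring

lemma pvSetFold2GetDRow (dd : Int → Int → Int) (js l : List Int) :
    ∀ (bal : List Int) (k : Nat),
      (l.foldl (fun b i =>
          js.foldl (fun b2 j => b2.set i.toNat (b2.getD i.toNat 0 + dd i j)) b) bal).getD k 0
      = bal.getD k 0
        + (l.map (fun i =>
            (js.map (fun j => if i.toNat = k ∧ k < bal.length then dd i j else 0)).sum)).sum := by
  induction l with
  | nil => intro bal k; simp
  | cons i l ih =>
    intro bal k
    rw [List.foldl_cons, ih, pvSetFoldGetDConst i.toNat (dd i) js bal,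
        pvSetFoldLenConst i.toNat (dd i) js bal]
    simp only [List.map_cons, List.sum_cons]
    ring

lemma pvSetFold2LenCol (dd : Int → Int → Int) (js l : List Int) (bal : List Int) :
    (l.foldl (fun b i =>
        js.foldl (fun b2 j => b2.set j.toNat (b2.getD j.toNat 0 + dd i j)) b) bal).length
    = bal.length := by
  induction l generalizing bal with
  | nil => rfl
  | cons i l ih => rw [List.foldl_cons, ih, pvSetFoldLenCol (dd i) js bal]

lemma pvSetFold2LenRow (dd : Int → Int → Int) (js l : List Int) (bal : List Int) :
    (l.foldl (fun b i =>
        js.foldl (fun b2 j => b2.set i.toNat (b2.getD i.toNat 0 + dd i j)) b) bal).length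
    = bal.length := by
  induction l generalizing bal with
  | nil => rfl
  | cons i l ih => rw [List.foldl_cons, ih, pvSetFoldLenConst i.toNat (dd i) js bal]

-- A fold that only accumulates: initial value + sum.
lemma pvFoldlAdd (h : Int → Int) (l : List Int) (c : Int) :
    l.foldl (fun c j => c + h j) c = c + (l.map h).sum := by
  induction l generalizing c with
  | nil => simp
  | cons j l ih => simp only [List.foldl_cons, List.map_cons, List.sum_cons, ih]; ring

-- 'all entries are zero' for a list characterised through getD.
lemma pvAllZero (l : List Int) :
    (l.all (fun b => b == 0)) = decide (∀ k, k < l.length → l.getD k 0 = 0) := by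
  rw [Bool.eq_iff_iff]
  simp only [List.all_eq_true, beq_iff_eq, decide_eq_true_eq]
  constructor
  · intro h k hk
    rw [List.getD_eq_getElem _ _ hk]
    exact h _ (List.getElem_mem hk)
  · intro h b hb
    obtain ⟨k, hk, rfl⟩ := List.mem_iff_getElem.mp hb
    rw [← List.getD_eq_getElem _ _ hk]
    exact h k hk

-- Bridge between A's all over range(0,n) and a ∀ over Nat indices below n.toNat.
lemma pvAllRange (n : Int) (p : Int → Bool) :
    ((PySem.List.pyRange 0 n 1).all p) = decide (∀ k : Nat, k < n.toNat → p (k : Int) = true) := by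
  rw [Bool.eq_iff_iff]
  simp only [List.all_eq_true, decide_eq_true_eq]
  constructor
  · intro h k hk
    exact h _ (PySem.List.mem_pyRange_one.mpr ⟨by positivity, by omega⟩)
  · intro h i hi
    have hm := PySem.List.mem_pyRange_one.mp hi
    have : i = ((i.toNat : Nat) : Int) := by omega
    rw [this]
    exact h i.toNat (by omega)

-- ===== VERDICT (by name: the statement is the Claim_ definition above) =====
theorem memeNombreZeroUn_spec : Claim_equal_memeNombreZeroUn := by
  intro taille tableau colonne _ _
  unfold Spec_memeNombreZeroUn memeNombreZeroUn memeNombreZeroUn_alt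
  by_cases ht : taille ≤ 0
  · -- empty range on both sides: A's loops are vacuous, B's sweep leaves ([], 0)
    rw [PySem.List.pyRange_one_eq_nil (by omega)]
    cases colonne <;> simp [show ¬ (0 < taille) by omega]
  · have hn : 0 < taille := by omega
    have hlen : ((PySem.List.pyRange 0 taille 1).length : Int) = taille := by
      rw [PySem.List.length_pyRange_one]; omega
    rw [if_pos hn]
    cases colonne
    · -- colonne = false: lines are columns, reference line is row 0
      simp only [Bool.false_eq_true, if_false, pvFoldCount, hlen, zero_add]
      rw [pvFinal]
      have hsplit :
          (fun (st : List Int × Int) i =>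
            (PySem.List.pyRange 0 taille 1).foldl (fun (st : List Int × Int) j =>
              (st.1.set j.toNat
                 (st.1.getD j.toNat 0 + (if pvCellB tableau i j = 1 then 1 else -1)),
               if i = 0 then st.2 + (if pvCellB tableau i j = 1 then 1 else -1) else st.2)) st)
          = (fun (st : List Int × Int) i =>
            ((PySem.List.pyRange 0 taille 1).foldl
               (fun b j => b.set j.toNat (b.getD j.toNat 0 + pvD tableau i j)) st.1,
             (PySem.List.pyRange 0 taille 1).foldl
               (fun c j => if i = 0 then c + pvD tableau i j else c) st.2)) := by
        funext st i
        rw [← pvFoldlProd]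
        simp only [pvD]
      rw [hsplit]
      have hmain := pvFoldlProd
        (fun (b : List Int) (i : Int) => (PySem.List.pyRange 0 taille 1).foldl
           (fun b j => b.set j.toNat (b.getD j.toNat 0 + pvD tableau i j)) b)
        (fun (c : Int) (i : Int) => (PySem.List.pyRange 0 taille 1).foldl
           (fun c j => if i = 0 then c + pvD tableau i j else c) c)
        (PySem.List.pyRange 0 taille 1) (List.replicate taille.toNat 0) 0
      try simp only [] at hmain
      rw [hmain]
      dsimp only
      congr 1
      · -- cross part = balance of row 0 = A's firstColumn check
        have hstep : ∀ i : Int,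
            (fun c : Int => (PySem.List.pyRange 0 taille 1).foldl
               (fun c j => if i = 0 then c + pvD tableau i j else c) c)
            = fun c : Int => c + (if i = (((0:Nat)):Int) then
                ((PySem.List.pyRange 0 taille 1).map (fun j => pvD tableau i j)).sum else 0) := by
          intro i
          funext c
          rw [pvFoldlIteAdd (fun _ => i = 0)]
          congr 1
          by_cases h : i = 0
          · rw [if_pos (by exact_mod_cast h)]
            apply congrArg List.sum
            apply List.map_congr_left
            intro j _
            rw [if_pos h]
          · rw [if_neg (by exact_mod_cast h), pvSumZero]
            intro j _
            rw [if_neg h]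
        have hcross :
            (PySem.List.pyRange 0 taille 1).foldl
              (fun c i => (PySem.List.pyRange 0 taille 1).foldl
                (fun c j => if i = 0 then c + pvD tableau i j else c) c) 0
            = ((PySem.List.pyRange 0 taille 1).map (fun j => pvD tableau 0 j)).sum := by
          calc (PySem.List.pyRange 0 taille 1).foldl
                (fun c i => (PySem.List.pyRange 0 taille 1).foldl
                  (fun c j => if i = 0 then c + pvD tableau i j else c) c) 0
              = (PySem.List.pyRange 0 taille 1).foldl
                (fun c i => c + (if i = (((0:Nat)):Int) then
                  ((PySem.List.pyRange 0 taille 1).map (fun j => pvD tableau i j)).sum else 0)) 0 := by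
                  apply PySem.List.foldl_congr_mem
                  intro c i _
                  exact congrFun (hstep i) c
            _ = ((PySem.List.pyRange 0 taille 1).map (fun j => pvD tableau 0 j)).sum := by
                  rw [pvFoldlAdd (fun i => if i = (((0:Nat)):Int) then
                        ((PySem.List.pyRange 0 taille 1).map (fun j => pvD tableau i j)).sum
                        else 0),
                      pvSingleHit taille 0 (by omega), zero_add]
                  norm_num
        rw [hcross]
        have hpm : ((PySem.List.pyRange 0 taille 1).map (fun j => pvD tableau 0 j)).sum
            = 2 * (((PySem.List.pyRange 0 taille 1).map
                (fun i => PySem.List.pyGetD (PySem.List.pyGetD tableau 0 []) i 0)).count 1 : Int)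
              - taille := by
          rw [show (fun j => pvD tableau 0 j) = fun j => if (fun i => PySem.List.pyGetD
                (PySem.List.pyGetD tableau 0 []) i 0) j = 1 then (1:Int) else -1 from rfl,
              pvSumPM, hlen]
        rw [hpm, Bool.eq_iff_iff]
        simp only [beq_iff_eq, decide_eq_true_eq]
        omega
      · -- balance vector part: entry k is the column-k balance
        rw [pvAllZero, pvSetFold2LenCol (fun i j => pvD tableau i j),
            pvAllRange, List.length_replicate]
        rw [Bool.eq_iff_iff]
        simp only [decide_eq_true_eq]
        have hbal : ∀ k : Nat, k < taille.toNat →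
            ((PySem.List.pyRange 0 taille 1).foldl (fun b i =>
              (PySem.List.pyRange 0 taille 1).foldl
                (fun b2 j => b2.set j.toNat (b2.getD j.toNat 0 + pvD tableau i j)) b)
              (List.replicate taille.toNat 0)).getD k 0
            = 2 * (((PySem.List.pyRange 0 taille 1).map
                (fun j => PySem.List.pyGetD (PySem.List.pyGetD tableau j []) ((k:Nat) : Int) 0)).count 1 : Int)
              - taille := by
          intro k hk
          rw [pvSetFold2GetDCol (fun i j => pvD tableau i j)]
          have hinner : ∀ i ∈ PySem.List.pyRange 0 taille 1,
              ((PySem.List.pyRange 0 taille 1).map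
                (fun j => if j.toNat = k ∧ k < (List.replicate taille.toNat (0:Int)).length
                  then pvD tableau i j else 0)).sum
              = (fun i => pvD tableau i ((k:Nat) : Int)) i := by
            intro i _
            have hmap : ((PySem.List.pyRange 0 taille 1).map
                (fun j => if j.toNat = k ∧ k < (List.replicate taille.toNat (0:Int)).length
                  then pvD tableau i j else 0))
                = ((PySem.List.pyRange 0 taille 1).map
                  (fun j => if j = ((k:Nat) : Int) then pvD tableau i j else 0)) := by
              apply List.map_congr_left
              intro j hj
              have hm := PySem.List.mem_pyRange_one.mp hj
              by_cases h : j = ((k:Nat) : Int)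
              · rw [if_pos h, if_pos ⟨by omega, by rw [List.length_replicate]; omega⟩]
              · rw [if_neg h, if_neg (by omega)]
            rw [hmap, pvSingleHit taille k (by omega)]
          rw [List.map_congr_left hinner]
          have hrep : (List.replicate taille.toNat (0:Int)).getD k 0 = 0 :=
            List.getD_replicate (x := (0 : Int)) hk
          rw [hrep]
          rw [show (fun i => pvD tableau i ((k:Nat) : Int))
                = fun j => if (fun j => PySem.List.pyGetD (PySem.List.pyGetD tableau j [])
                    ((k:Nat) : Int) 0) j = 1 then (1:Int) else -1 from rfl,
              pvSumPM, hlen]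
          ring
        constructor
        · intro h k hk
          rw [hbal k hk]
          have hh := h k hk
          omega
        · intro h k hk
          have hh := h k hk
          rw [hbal k hk] at hh
          omega
    · -- colonne = true: lines are rows, reference line is column 0
      simp only [if_true, pvFoldCount, hlen, zero_add]
      rw [pvFinal]
      have hsplit :
          (fun (st : List Int × Int) i =>
            (PySem.List.pyRange 0 taille 1).foldl (fun (st : List Int × Int) j =>
              (st.1.set i.toNat
                 (st.1.getD i.toNat 0 + (if pvCellB tableau i j = 1 then 1 else -1)),
               if j = 0 then st.2 + (if pvCellB tableau i j = 1 then 1 else -1) else st.2)) st)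
          = (fun (st : List Int × Int) i =>
            ((PySem.List.pyRange 0 taille 1).foldl
               (fun b j => b.set i.toNat (b.getD i.toNat 0 + pvD tableau i j)) st.1,
             (PySem.List.pyRange 0 taille 1).foldl
               (fun c j => if j = 0 then c + pvD tableau i j else c) st.2)) := by
        funext st i
        rw [← pvFoldlProd]
        simp only [pvD]
      rw [hsplit]
      have hmain := pvFoldlProd
        (fun (b : List Int) (i : Int) => (PySem.List.pyRange 0 taille 1).foldl
           (fun b j => b.set i.toNat (b.getD i.toNat 0 + pvD tableau i j)) b)
        (fun (c : Int) (i : Int) => (PySem.List.pyRange 0 taille 1).foldl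
           (fun c j => if j = 0 then c + pvD tableau i j else c) c)
        (PySem.List.pyRange 0 taille 1) (List.replicate taille.toNat 0) 0
      try simp only [] at hmain
      rw [hmain]
      dsimp only
      congr 1
      · -- cross part = balance of column 0 = A's firstRow check
        have hstep : ∀ i : Int,
            (fun c : Int => (PySem.List.pyRange 0 taille 1).foldl
               (fun c j => if j = 0 then c + pvD tableau i j else c) c)
            = fun c : Int => c + pvD tableau i 0 := by
          intro i
          funext c
          rw [pvFoldlIteAdd (fun j => j = 0)]
          congr 1
          have hmap : ((PySem.List.pyRange 0 taille 1).map
              (fun j => if j = (0:Int) then pvD tableau i j else 0))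
              = ((PySem.List.pyRange 0 taille 1).map
                (fun j => if j = (((0:Nat)):Int) then pvD tableau i j else 0)) := by
            norm_num
          rw [hmap, pvSingleHit taille 0 (by omega)]
          norm_num
        have hcross :
            (PySem.List.pyRange 0 taille 1).foldl
              (fun c i => (PySem.List.pyRange 0 taille 1).foldl
                (fun c j => if j = 0 then c + pvD tableau i j else c) c) 0
            = ((PySem.List.pyRange 0 taille 1).map (fun i => pvD tableau i 0)).sum := by
          calc (PySem.List.pyRange 0 taille 1).foldl
                (fun c i => (PySem.List.pyRange 0 taille 1).foldl
                  (fun c j => if j = 0 then c + pvD tableau i j else c) c) 0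
              = (PySem.List.pyRange 0 taille 1).foldl
                (fun c i => c + pvD tableau i 0) 0 := by
                  apply PySem.List.foldl_congr_mem
                  intro c i _
                  exact congrFun (hstep i) c
            _ = ((PySem.List.pyRange 0 taille 1).map (fun i => pvD tableau i 0)).sum := by
                  rw [pvFoldlAdd (fun i => pvD tableau i 0), zero_add]
        rw [hcross]
        have hpm : ((PySem.List.pyRange 0 taille 1).map (fun i => pvD tableau i 0)).sum
            = 2 * (((PySem.List.pyRange 0 taille 1).map
                (fun i => PySem.List.pyGetD (PySem.List.pyGetD tableau i []) 0 0)).count 1 : Int)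
              - taille := by
          rw [show (fun i => pvD tableau i 0) = fun j => if (fun i => PySem.List.pyGetD
                (PySem.List.pyGetD tableau i []) 0 0) j = 1 then (1:Int) else -1 from rfl,
              pvSumPM, hlen]
        rw [hpm, Bool.eq_iff_iff]
        simp only [beq_iff_eq, decide_eq_true_eq]
        omega
      · -- balance vector part: entry k is the row-k balance
        rw [pvAllZero, pvSetFold2LenRow (fun i j => pvD tableau i j),
            pvAllRange, List.length_replicate]
        rw [Bool.eq_iff_iff]
        simp only [decide_eq_true_eq]
        have hbal : ∀ k : Nat, k < taille.toNat →
            ((PySem.List.pyRange 0 taille 1).foldl (fun b i =>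
              (PySem.List.pyRange 0 taille 1).foldl
                (fun b2 j => b2.set i.toNat (b2.getD i.toNat 0 + pvD tableau i j)) b)
              (List.replicate taille.toNat 0)).getD k 0
            = 2 * (((PySem.List.pyRange 0 taille 1).map
                (fun j => PySem.List.pyGetD (PySem.List.pyGetD tableau ((k:Nat) : Int) []) j 0)).count 1 : Int)
              - taille := by
          intro k hk
          rw [pvSetFold2GetDRow (fun i j => pvD tableau i j)]
          have houter : ∀ i ∈ PySem.List.pyRange 0 taille 1,
              ((PySem.List.pyRange 0 taille 1).map
                (fun j => if i.toNat = k ∧ k < (List.replicate taille.toNat (0:Int)).length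
                  then pvD tableau i j else 0)).sum
              = (fun i => if i = ((k:Nat) : Int) then
                  ((PySem.List.pyRange 0 taille 1).map (fun j => pvD tableau i j)).sum
                  else 0) i := by
            intro i hi
            have hm := PySem.List.mem_pyRange_one.mp hi
            change _ = if i = ((k:Nat) : Int) then
              ((PySem.List.pyRange 0 taille 1).map (fun j => pvD tableau i j)).sum else 0
            by_cases h : i = ((k:Nat) : Int)
            · rw [if_pos h]
              apply congrArg List.sum
              apply List.map_congr_left
              intro j _
              rw [if_pos ⟨by omega, by rw [List.length_replicate]; omega⟩]
            · rw [if_neg h]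
              apply pvSumZero
              intro j _
              rw [if_neg (by omega)]
          rw [List.map_congr_left houter, pvSingleHit taille k (by omega)]
          have hrep : (List.replicate taille.toNat (0:Int)).getD k 0 = 0 :=
            List.getD_replicate (x := (0 : Int)) hk
          rw [hrep]
          rw [show (fun j => pvD tableau ((k:Nat):Int) j)
                = fun j => if (fun j => PySem.List.pyGetD
                    (PySem.List.pyGetD tableau ((k:Nat):Int) []) j 0) j = 1
                  then (1:Int) else -1 from rfl,
              pvSumPM, hlen]
          ring
        constructor
        · intro h k hk
          rw [hbal k hk]
          have hh := h k hk
          omega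
        · intro h k hk
          have hh := h k hk
          rw [hbal k hk] at hh
          omega
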